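-- pv_equiv track=rewrite | github.com/Shohid24/shohid24 | public/data/getID.py | getNthCombination
-- ===== SOURCE A (Python) =====
-- def getNthCombination(n: int) -> str:
--     """
--     Returns the nth possible 3-letter combination using lowercase letters a-z.
--
--     Args:
--         n: Index of the combination (0 to 26^3 - 1)
--
--     Returns:
--         str: The nth 3-letter combination
--
--     Raises:
--         ValueError: If n is outside the valid range
--     """
--     # Check if n is within valid range
--     max_combinations = 26**3
--     if n < 0 or n >= max_combinations:
--         raise ValueError(f"Index must be between 0 and {max_combinations - 1}")
--
--     letters = "abcdefghijklmnopqrstuvwxyz"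
--     result = []
--
--     # Convert to base 26 for 3 letters
--     for _ in range(3):
--         n, remainder = divmod(n, 26)
--         result.append(letters[remainder])
--
--     # Reverse and join the result
--     return "".join(reversed(result))
-- ===== SOURCE B (Python) =====
-- def getNthCombination(n: int) -> str:
--     max_combinations = 26**3
--     if n < 0 or n >= max_combinations:
--         raise ValueError(f"Index must be between 0 and {max_combinations - 1}")
--     letters = "abcdefghijklmnopqrstuvwxyz"
--     return letters[n // 676] + letters[(n // 26) % 26] + letters[n % 26]
-- ===== Notes on version B (the rewrite author's own statement) =====
-- stated objective: simpler
-- what changed: Replaces the divmod loop with accumulator list and final reversal by a closed-form extraction of the three base-26 digits most-significant-first (n//676, (n//26)%26, n%26) concatenated directly.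
import Mathlib
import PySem

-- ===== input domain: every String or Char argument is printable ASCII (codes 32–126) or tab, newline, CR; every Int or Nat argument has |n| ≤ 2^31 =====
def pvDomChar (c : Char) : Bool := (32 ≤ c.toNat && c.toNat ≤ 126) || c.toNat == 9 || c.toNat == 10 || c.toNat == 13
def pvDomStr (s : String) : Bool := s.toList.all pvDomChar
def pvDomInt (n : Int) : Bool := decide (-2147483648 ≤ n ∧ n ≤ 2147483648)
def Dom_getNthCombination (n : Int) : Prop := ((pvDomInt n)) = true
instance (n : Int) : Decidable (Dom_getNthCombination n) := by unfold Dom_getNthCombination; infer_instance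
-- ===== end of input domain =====

-- B replaces A's divmod loop + accumulator + reversal by a closed-form most-significant-first
-- extraction of the three base-26 digits (objective: simpler).

-- ===== PORT A =====
-- loop body: n, remainder = divmod(n, 26); result.append(letters[remainder]).
-- letters[remainder] is always in range (0 ≤ remainder < 26), so the IndexError branch of
-- pyGet? is unreachable; .getD 'a' only makes the port total.
def getNthCombination (n : Int) : String :=
  let letters : String := "abcdefghijklmnopqrstuvwxyz"
  let st := (PySem.List.pyRange 0 3 1).foldl
    (fun (st : Int × List Char) _ =>
      let r := PySem.Int.mod st.1 26
      let n' := PySem.Int.floordiv st.1 26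
      (n', st.2 ++ [(PySem.Str.pyGet? letters r).getD 'a']))
    (n, [])
  -- "".join(reversed(result)) over 1-char strings = the chars in reverse order
  String.ofList st.2.reverse

-- ===== PORT B =====
-- letters[n // 676] + letters[(n // 26) % 26] + letters[n % 26]; indices are in range
-- under Pre_, so .getD 'a' is never the result.
def getNthCombination_alt (n : Int) : String :=
  let letters : String := "abcdefghijklmnopqrstuvwxyz"
  String.ofList [(PySem.Str.pyGet? letters (PySem.Int.floordiv n 676)).getD 'a',
             (PySem.Str.pyGet? letters (PySem.Int.mod (PySem.Int.floordiv n 26) 26)).getD 'a',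
             (PySem.Str.pyGet? letters (PySem.Int.mod n 26)).getD 'a']

-- ===== PRECONDITION & SPEC =====
-- A raises ValueError for n < 0 or n ≥ 26**3; those inputs are excluded.
def Pre_getNthCombination (n : Int) : Prop := 0 ≤ n ∧ n < 17576
instance (n : Int) : Decidable (Pre_getNthCombination n) := by unfold Pre_getNthCombination; infer_instance
def pvWitness_getNthCombination : Int := (42)

def Spec_getNthCombination (n : Int) (out : String) : Prop := out = getNthCombination_alt n
instance (n : Int) (out : String) : Decidable (Spec_getNthCombination n out) := by unfold Spec_getNthCombination; infer_instance

-- ===== CLAIM (what is proved, stated in full; the proofs are below) =====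
def Claim_equal_getNthCombination : Prop := ∀ (n : Int), Dom_getNthCombination n → Pre_getNthCombination n → Spec_getNthCombination n (getNthCombination n)

-- ===== LEMMAS AND PROOFS =====

-- A's third remainder (after two floor-divisions by 26) equals B's leading digit n // 676.
theorem third_digit_eq (n : Int) (h0 : 0 ≤ n) (h1 : n < 17576) :
    PySem.Int.mod (PySem.Int.floordiv (PySem.Int.floordiv n 26) 26) 26 =
      PySem.Int.floordiv n 676 := by
  rw [PySem.Int.floordiv_eq_ediv_of_pos (a := n) (by norm_num),
      PySem.Int.floordiv_eq_ediv_of_pos (by norm_num),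
      PySem.Int.floordiv_eq_ediv_of_pos (a := n) (by norm_num),
      PySem.Int.mod_eq_emod_of_pos (by norm_num)]
  omega

-- ===== VERDICT (by name: the statement is the Claim_ definition above) =====
theorem getNthCombination_spec : Claim_equal_getNthCombination := by
  intro n _ hpre
  obtain ⟨h0, h1⟩ := hpre
  unfold Spec_getNthCombination getNthCombination getNthCombination_alt
  have hr : PySem.List.pyRange 0 3 1 = [0, 1, 2] := by decide
  rw [hr]
  simp only [List.foldl]
  rw [third_digit_eq n h0 h1]
  rfl
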